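-- pv_equiv track=rewrite | github.com/julian-q/MagiAttention | magi_attention/common/ranges.py | is_valid_cu_seqlens
-- ===== SOURCE A (Python) =====
-- def is_valid_cu_seqlens(cu_seqlens: list[int], seq_len: int) -> bool:
--     if len(cu_seqlens) == 0:
--         return True
--
--     if not cu_seqlens[0] == 0:
--         return False
--
--     if not all(cu_seqlens[i - 1] < cu_seqlens[i] for i in range(1, len(cu_seqlens))):
--         return False
--
--     if not cu_seqlens[-1] == seq_len:
--         return False
--
--     return True
-- ===== SOURCE B (Python) =====
-- def is_valid_cu_seqlens(cu_seqlens: list[int], seq_len: int) -> bool: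
--     if not cu_seqlens:
--         return True
--     return (cu_seqlens[0] == 0
--             and cu_seqlens[-1] == seq_len
--             and sorted(set(cu_seqlens)) == cu_seqlens)
-- ===== Notes on version B (the rewrite author's own statement) =====
-- stated objective: alternative
-- what changed: Replaces the explicit index-based adjacent-pairs monotonicity scan with a sort/set formulation: the list is valid iff its endpoints match and sorted(set(cu_seqlens)) equals the list itself.
import Mathlib
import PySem

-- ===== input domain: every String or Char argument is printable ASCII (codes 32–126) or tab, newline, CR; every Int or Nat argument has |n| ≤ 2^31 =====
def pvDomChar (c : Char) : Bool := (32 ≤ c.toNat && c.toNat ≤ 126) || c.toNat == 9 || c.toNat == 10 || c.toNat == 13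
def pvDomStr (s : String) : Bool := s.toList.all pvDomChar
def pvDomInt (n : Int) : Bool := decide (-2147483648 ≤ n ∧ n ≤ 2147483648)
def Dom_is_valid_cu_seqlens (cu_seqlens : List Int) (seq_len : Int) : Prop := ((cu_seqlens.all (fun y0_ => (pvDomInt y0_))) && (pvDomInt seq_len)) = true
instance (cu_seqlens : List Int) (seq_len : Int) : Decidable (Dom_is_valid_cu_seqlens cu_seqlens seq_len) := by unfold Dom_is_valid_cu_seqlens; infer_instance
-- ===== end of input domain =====

-- B replaces A's explicit index-based adjacent-pairs monotonicity scan by the sort/set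
-- formulation sorted(set(cu_seqlens)) == cu_seqlens plus the same endpoint checks (alternative, not faster).


-- ===== PORT A =====
def is_valid_cu_seqlens (cu_seqlens : List Int) (seq_len : Int) : Bool :=
  if cu_seqlens.length == 0 then true
  else if !(PySem.List.pyGetD cu_seqlens 0 0 == 0) then false
  else if !((PySem.List.pyRange 1 (cu_seqlens.length : Int) 1).all
      (fun i => decide (PySem.List.pyGetD cu_seqlens (i - 1) 0 < PySem.List.pyGetD cu_seqlens i 0))) then false
  else if !(PySem.List.pyGetD cu_seqlens (-1) 0 == seq_len) then false
  else true

-- ===== PORT B =====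
def is_valid_cu_seqlens_alt (cu_seqlens : List Int) (seq_len : Int) : Bool :=
  if cu_seqlens.isEmpty then true
  else (PySem.List.pyGetD cu_seqlens 0 0 == 0)
    && (PySem.List.pyGetD cu_seqlens (-1) 0 == seq_len)
    && (PySem.List.sorted (PySem.Set.ofList cu_seqlens) (fun x => x) false == cu_seqlens)

-- ===== PRECONDITION & SPEC =====
def Spec_is_valid_cu_seqlens (cu_seqlens : List Int) (seq_len : Int) (out : Bool) : Prop := out = is_valid_cu_seqlens_alt cu_seqlens seq_len
instance (cu_seqlens : List Int) (seq_len : Int) (out : Bool) : Decidable (Spec_is_valid_cu_seqlens cu_seqlens seq_len out) := by unfold Spec_is_valid_cu_seqlens; infer_instance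

-- ===== CLAIM (what is proved, stated in full; the proofs are below) =====
def Claim_equal_is_valid_cu_seqlens : Prop := ∀ (cu_seqlens : List Int) (seq_len : Int), Dom_is_valid_cu_seqlens cu_seqlens seq_len → Spec_is_valid_cu_seqlens cu_seqlens seq_len (is_valid_cu_seqlens cu_seqlens seq_len)

-- ===== LEMMAS AND PROOFS =====

-- A's generator check over range(1, len) is exactly strict pairwise increase.
theorem chain_check_iff_pairwise (xs : List Int) :
    ((PySem.List.pyRange 1 (xs.length : Int) 1).all
      (fun i => decide (PySem.List.pyGetD xs (i - 1) 0 < PySem.List.pyGetD xs i 0))) = true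
    ↔ xs.Pairwise (· < ·) := by
  rw [List.all_eq_true, ← List.isChain_iff_pairwise, List.isChain_iff_getElem]
  constructor
  · intro h i hi
    have hm : ((i : Int) + 1) ∈ PySem.List.pyRange 1 (xs.length : Int) 1 := by
      rw [PySem.List.mem_pyRange_one]; omega
    have hthis := h _ hm
    simp only [decide_eq_true_eq] at hthis
    have e1 : PySem.List.pyGetD xs ((i : Int) + 1 - 1) 0 = xs[i] := by
      rw [show ((i : Int) + 1 - 1) = ((i : Nat) : Int) by ring,
        PySem.List.pyGetD_eq_getElem xs 0 (by omega) (by exact_mod_cast (by omega : i < xs.length))]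
      simp
    have e2 : PySem.List.pyGetD xs ((i : Int) + 1) 0 = xs[i + 1] := by
      rw [show ((i : Int) + 1) = ((i + 1 : Nat) : Int) by push_cast; ring,
        PySem.List.pyGetD_eq_getElem xs 0 (by omega) (by exact_mod_cast hi)]
      simp
    rwa [e1, e2] at hthis
  · intro h i hm
    rw [PySem.List.mem_pyRange_one] at hm
    have hi1 : (i - 1).toNat + 1 < xs.length := by omega
    have hthis := h (i - 1).toNat hi1
    simp only [decide_eq_true_eq]
    have e1 : PySem.List.pyGetD xs (i - 1) 0 = xs[(i - 1).toNat] :=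
      PySem.List.pyGetD_eq_getElem xs 0 (by omega) (by omega)
    have e2 : PySem.List.pyGetD xs i 0 = xs[i.toNat] :=
      PySem.List.pyGetD_eq_getElem xs 0 (by omega) (by omega)
    rw [e1, e2]
    convert hthis using 2
    omega

-- B's sorted(set(xs)) == xs test is also exactly strict pairwise increase.
theorem sorted_set_iff_pairwise (xs : List Int) :
    PySem.List.sorted (PySem.Set.ofList xs) (fun x => x) false = xs
    ↔ xs.Pairwise (· < ·) := by
  constructor
  · intro h
    have := PySem.List.sorted_ofList_pairwise_lt (xs := xs)
    rwa [h] at this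
  · intro h
    have hnd : xs.Nodup := h.imp (fun hlt => ne_of_lt hlt)
    rw [PySem.Set.ofList_eq_self_of_nodup xs hnd]
    exact PySem.List.sorted_eq_self_of_pairwise xs (fun x => x) (h.imp (fun hlt => le_of_lt hlt))

-- ===== VERDICT (by name: the statement is the Claim_ definition above) =====
theorem is_valid_cu_seqlens_spec : Claim_equal_is_valid_cu_seqlens := by
  intro xs seq_len _
  unfold Spec_is_valid_cu_seqlens is_valid_cu_seqlens is_valid_cu_seqlens_alt
  by_cases he : xs = []
  · subst he; simp
  · have hne : xs.isEmpty = false := by simp [he]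
    have hlen : (xs.length == 0) = false := by simp [List.length_eq_zero_iff, he]
    rw [hlen, hne]
    simp only [Bool.false_eq_true, if_false]
    by_cases h0 : PySem.List.pyGetD xs 0 0 = 0
    · by_cases hc : ((PySem.List.pyRange 1 (xs.length : Int) 1).all
          (fun i => decide (PySem.List.pyGetD xs (i - 1) 0 < PySem.List.pyGetD xs i 0))) = true
      · have hs := (sorted_set_iff_pairwise xs).mpr ((chain_check_iff_pairwise xs).mp hc)
        by_cases hl : PySem.List.pyGetD xs (-1) 0 = seq_len <;>
          simp [h0, hc, hl, hs, -List.all_eq_true]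
      · have hsne : ¬ (PySem.List.sorted (PySem.Set.ofList xs) (fun x => x) false = xs) := by
          intro hs
          exact hc ((chain_check_iff_pairwise xs).mpr ((sorted_set_iff_pairwise xs).mp hs))
        simp [h0, hc, hsne, -List.all_eq_true]
    · simp [h0]
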